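-- pv_equiv track=rewrite | github.com/alphadome/python | TH Projects/Port/tools/general/scraper/scraper.py | code_url
-- ===== SOURCE A (Python) =====
-- def code_url(url):
--     reserved_list = ['<', '>', ':', '"', '/', '\\', '|', '?', '*', '.', '%', ' ']
--     raw_named_list = ['lt', 'gt', 'co', 'qu', 'bs', 'fs', 'sl', 'qm', 'as', 'pb', 'pc', 'sp']
--     named_list = []
--     for name in raw_named_list:
--         named_list.append(str("TH-")+str(name))
--
--     coded_url = url
--     for i in range(len(reserved_list)-1):
--         symbol = reserved_list[i]
--         if symbol in url:
--             coded_url = coded_url.replace(symbol, named_list[i])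
--
--     return coded_url
-- ===== SOURCE B (Python) =====
-- def code_url(url):
--     # Translation table for the 11 characters the original encodes
--     # (the trailing ' ' entry of the original's list is never used by it).
--     table = {'<': 'TH-lt', '>': 'TH-gt', ':': 'TH-co', '"': 'TH-qu',
--              '/': 'TH-bs', '\\': 'TH-fs', '|': 'TH-sl', '?': 'TH-qm',
--              '*': 'TH-as', '.': 'TH-pb', '%': 'TH-pc'}
--     return ''.join(table.get(ch, ch) for ch in url)
-- ===== Notes on version B (the rewrite author's own statement) =====
-- stated objective: idiomatic
-- what changed: Replaces the eleven sequential str.replace passes with a single character-by-character scan over url using a precomputed translation dict, joining the mapped pieces once.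
import Mathlib
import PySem

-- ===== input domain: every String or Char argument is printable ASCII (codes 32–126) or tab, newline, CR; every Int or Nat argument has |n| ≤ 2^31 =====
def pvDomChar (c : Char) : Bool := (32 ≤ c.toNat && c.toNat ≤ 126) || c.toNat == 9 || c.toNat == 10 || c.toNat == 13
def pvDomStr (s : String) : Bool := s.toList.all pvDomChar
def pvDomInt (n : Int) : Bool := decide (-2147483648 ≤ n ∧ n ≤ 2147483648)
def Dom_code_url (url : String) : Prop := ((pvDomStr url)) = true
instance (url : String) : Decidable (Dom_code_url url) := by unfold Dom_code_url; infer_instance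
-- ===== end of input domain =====

-- B replaces the eleven sequential str.replace passes with one char-by-char scan
-- over url using a precomputed translation dict (idiomatic).

-- ===== PORT A =====
def code_url (url : String) : String :=
  let reserved_list : List String := ["<", ">", ":", "\"", "/", "\\", "|", "?", "*", ".", "%", " "]
  let raw_named_list : List String := ["lt","gt","co","qu","bs","fs","sl","qm","as","pb","pc","sp"]
  let named_list : List String := raw_named_list.foldl (fun acc name => acc ++ ["TH-" ++ name]) []
  let coded_url :=
    (PySem.List.pyRange 0 ((reserved_list.length : Int) - 1) 1).foldl
      (fun coded i =>
        let symbol := PySem.List.pyGetD reserved_list i ""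
        if PySem.Str.isIn symbol url then
          PySem.Str.replace coded symbol (PySem.List.pyGetD named_list i "")
        else coded)
      url
  coded_url

-- ===== PORT B =====
def thTable : PySem.Dict Char String :=
  PySem.Dict.ofList [('<', "TH-lt"), ('>', "TH-gt"), (':', "TH-co"), ('"', "TH-qu"),
    ('/', "TH-bs"), ('\\', "TH-fs"), ('|', "TH-sl"), ('?', "TH-qm"),
    ('*', "TH-as"), ('.', "TH-pb"), ('%', "TH-pc")]

def code_url_alt (url : String) : String :=
  PySem.Str.join "" (url.toList.map (fun ch => PySem.Dict.getD thTable ch (String.ofList [ch])))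

-- ===== PRECONDITION & SPEC =====
def Spec_code_url (url : String) (out : String) : Prop := out = code_url_alt url
instance (url : String) (out : String) : Decidable (Spec_code_url url out) := by unfold Spec_code_url; infer_instance

-- ===== CLAIM (what is proved, stated in full; the proofs are below) =====
def Claim_equal_code_url : Prop := ∀ (url : String), Dom_code_url url → Spec_code_url url (code_url url)

-- ===== LEMMAS AND PROOFS =====

-- the eleven (symbol, code) pairs of A, in processing order
def pvPairs : List (Char × List Char) :=
  [('<', "TH-lt".toList), ('>', "TH-gt".toList), (':', "TH-co".toList), ('"', "TH-qu".toList),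
   ('/', "TH-bs".toList), ('\\', "TH-fs".toList), ('|', "TH-sl".toList), ('?', "TH-qm".toList),
   ('*', "TH-as".toList), ('.', "TH-pb".toList), ('%', "TH-pc".toList)]

-- the per-character translation realised by a prefix of the passes
def pvTr : List (Char × List Char) → Char → List Char
  | [], c => [c]
  | (s, n) :: rest, c => if c = s then n else pvTr rest c

theorem go_single (c : Char) (new : List Char) :
    ∀ (fuel : Nat) (l acc : List Char), l.length ≤ fuel →
    PySem.Chars.replace.go [c] new fuel l acc
      = acc.reverse ++ l.flatMap (fun x => if x = c then new else [x]) := by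
  intro fuel
  induction fuel with
  | zero =>
    intro l acc h
    have : l = [] := List.eq_nil_of_length_eq_zero (Nat.le_zero.mp h)
    subst this
    simp [PySem.Chars.replace.go]
  | succ n ih =>
    intro l acc h
    cases l with
    | nil => simp [PySem.Chars.replace.go]
    | cons x t =>
      simp only [PySem.Chars.replace.go]
      by_cases hx : x = c
      · subst hx
        have hpre : List.isPrefixOf [x] (x :: t) = true := by simp [List.isPrefixOf]
        rw [if_pos hpre]
        show PySem.Chars.replace.go [x] new n (List.drop 1 (x :: t)) (new.reverse ++ acc) = _
        rw [List.drop_one, List.tail_cons,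
          ih t (new.reverse ++ acc) (Nat.lt_succ_iff.mp (by simpa using h))]
        simp
      · have hpre : List.isPrefixOf [c] (x :: t) = false := by
          simp [List.isPrefixOf]; exact fun h' => hx (by simp [h'])
        rw [if_neg (by simp [hpre])]
        rw [ih t (x :: acc) (Nat.lt_succ_iff.mp (by simpa using h))]
        simp [hx]

-- replacing a single character is a per-character flatMap
theorem replace_single (s : List Char) (c : Char) (new : List Char) :
    PySem.Chars.replace s [c] new = s.flatMap (fun x => if x = c then new else [x]) := by
  rw [PySem.Chars.replace]
  simp only [List.isEmpty_cons, Bool.false_eq_true, if_false]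
  simpa using go_single c new s.length s [] (le_refl _)

theorem flatMap_id_of_not_mem {l : List Char} {c : Char} (h : c ∉ l) (new : List Char) :
    l.flatMap (fun x => if x = c then new else [x]) = l := by
  induction l with
  | nil => simp
  | cons x t ih =>
    simp only [List.mem_cons, not_or] at h
    rw [List.flatMap_cons, if_neg (fun e => h.1 e.symm), ih h.2]
    rfl

theorem pvTr_step (sym : Char) (code : List Char) :
    ∀ (done : List (Char × List Char)) (c : Char), (∀ q ∈ done, sym ∉ q.2) →
    (pvTr done c).flatMap (fun x => if x = sym then code else [x])
      = pvTr (done ++ [(sym, code)]) c := by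
  intro done
  induction done with
  | nil => intro c _; simp [pvTr]
  | cons p rest ih =>
    intro c h
    obtain ⟨s, n⟩ := p
    by_cases hc : c = s
    · simp only [pvTr, List.cons_append, hc]
      exact flatMap_id_of_not_mem (h (s, n) (by simp)) code
    · simp only [pvTr, List.cons_append, if_neg hc]
      exact ih c (fun q hq => h q (by simp [hq]))

theorem pvTr_step_skip (sym : Char) (code : List Char) :
    ∀ (done : List (Char × List Char)) (c : Char), c ≠ sym →
    pvTr (done ++ [(sym, code)]) c = pvTr done c := by
  intro done
  induction done with
  | nil => intro c hc; simp [pvTr, hc]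
  | cons p rest ih =>
    intro c hc
    obtain ⟨s, n⟩ := p
    by_cases h : c = s <;> simp [pvTr, h, ih c hc]

-- the invariant of A's pass loop, on the character-list level
theorem foldA (url : List Char) :
    ∀ (todo done : List (Char × List Char)),
    (∀ p ∈ todo, ∀ q ∈ done ++ todo, p.1 ∉ q.2) →
    todo.foldl
      (fun coded p =>
        if PySem.Chars.isIn [p.1] url then PySem.Chars.replace coded [p.1] p.2 else coded)
      (url.flatMap (pvTr done))
      = url.flatMap (pvTr (done ++ todo)) := by
  intro todo
  induction todo with
  | nil => intro done _; simp
  | cons p rest ih =>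
    intro done h
    obtain ⟨sym, code⟩ := p
    simp only [List.foldl_cons]
    have hdone : ∀ q ∈ done, sym ∉ q.2 := by
      intro q hq
      exact h (sym, code) (by simp) q (by simp [hq])
    have hstep :
        (if PySem.Chars.isIn [sym] url then
          PySem.Chars.replace (url.flatMap (pvTr done)) [sym] code
        else url.flatMap (pvTr done))
        = url.flatMap (pvTr (done ++ [(sym, code)])) := by
      by_cases hin : PySem.Chars.isIn [sym] url = true
      · rw [if_pos hin, replace_single, List.flatMap_assoc]
        exact List.flatMap_congr (fun c _ => pvTr_step sym code done c hdone)
      · rw [if_neg hin]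
        have hmem : sym ∉ url := by
          intro hmem
          refine hin ?_
          rw [PySem.Chars.isIn_iff_infix]
          exact (List.singleton_infix_iff sym url).mpr hmem
        refine List.flatMap_congr (fun c hc => ?_)
        exact (pvTr_step_skip sym code done c (fun hce => hmem (hce ▸ hc))).symm
    rw [hstep]
    have := ih (done ++ [(sym, code)]) (by
      intro q hq r hr
      exact h q (by simp [hq]) r (by simpa [List.append_assoc] using hr))
    simpa [List.append_assoc] using this

-- bridge: A's String-level fold computes the character-list fold
theorem str_fold_toList (url : String) :
    ∀ (ps : List (Char × List Char)) (s : String),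
    (ps.foldl (fun coded p => if PySem.Str.isIn (String.ofList [p.1]) url then
        PySem.Str.replace coded (String.ofList [p.1]) (String.ofList p.2) else coded) s).toList
    = ps.foldl (fun coded p => if PySem.Chars.isIn [p.1] url.toList then
        PySem.Chars.replace coded [p.1] p.2 else coded) s.toList := by
  intro ps
  induction ps with
  | nil => intro s; rfl
  | cons p rest ih =>
    intro s
    simp only [List.foldl_cons]
    rw [ih]
    congr 1
    by_cases hin : PySem.Chars.isIn [p.1] url.toList = true
    · rw [if_pos hin, if_pos (by simpa using hin)]
      simp [PySem.Str.replace]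
    · rw [if_neg hin, if_neg (by simpa using hin)]

theorem code_url_toList (url : String) :
    (code_url url).toList = url.toList.flatMap (pvTr pvPairs) := by
  have h0 : code_url url = pvPairs.foldl
      (fun coded p => if PySem.Str.isIn (String.ofList [p.1]) url then
        PySem.Str.replace coded (String.ofList [p.1]) (String.ofList p.2) else coded) url := rfl
  rw [h0, str_fold_toList]
  have hA := foldA url.toList pvPairs [] (by decide)
  simpa [pvTr] using hA

-- B's dict lookup agrees with the full translation chain
theorem getD_eq_pvTr (c : Char) :
    (PySem.Dict.getD thTable c (String.ofList [c])).toList = pvTr pvPairs c := by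
  rcases eq_or_ne c '<' with rfl | h1
  · decide
  rcases eq_or_ne c '>' with rfl | h2
  · decide
  rcases eq_or_ne c ':' with rfl | h3
  · decide
  rcases eq_or_ne c '"' with rfl | h4
  · decide
  rcases eq_or_ne c '/' with rfl | h5
  · decide
  rcases eq_or_ne c '\\' with rfl | h6
  · decide
  rcases eq_or_ne c '|' with rfl | h7
  · decide
  rcases eq_or_ne c '?' with rfl | h8
  · decide
  rcases eq_or_ne c '*' with rfl | h9
  · decide
  rcases eq_or_ne c '.' with rfl | h10
  · decide
  rcases eq_or_ne c '%' with rfl | h11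
  · decide
  have htab : thTable = PySem.Dict.mk [('<', "TH-lt"), ('>', "TH-gt"), (':', "TH-co"),
      ('"', "TH-qu"), ('/', "TH-bs"), ('\\', "TH-fs"), ('|', "TH-sl"), ('?', "TH-qm"),
      ('*', "TH-as"), ('.', "TH-pb"), ('%', "TH-pc")] := by rfl
  simp [htab, PySem.Dict.getD, pvPairs, pvTr, PySem.Dict.get?,
    Ne.symm h1, Ne.symm h2, Ne.symm h3, Ne.symm h4, Ne.symm h5, Ne.symm h6, Ne.symm h7,
    Ne.symm h8, Ne.symm h9, Ne.symm h10, Ne.symm h11, h1, h2, h3, h4, h5, h6, h7, h8, h9, h10, h11]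

theorem intersperse_nil_flatten (xs : List (List Char)) :
    (List.intersperse ([] : List Char) xs).flatten = xs.flatten := by
  induction xs with
  | nil => simp
  | cons a t ih => cases t <;> simp_all [List.intersperse]

theorem code_url_alt_toList (url : String) :
    (code_url_alt url).toList = url.toList.flatMap (pvTr pvPairs) := by
  unfold code_url_alt
  rw [PySem.Str.toList_join]
  show (List.intersperse ([] : List Char)
      ((url.toList.map (fun ch => PySem.Dict.getD thTable ch (String.ofList [ch]))).map String.toList)).flatten = _
  rw [intersperse_nil_flatten, List.map_map, List.flatten_eq_flatMap, List.flatMap_map]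
  exact List.flatMap_congr (fun c _ => getD_eq_pvTr c)

-- ===== VERDICT (by name: the statement is the Claim_ definition above) =====
theorem code_url_spec : Claim_equal_code_url := by
  intro url _
  unfold Spec_code_url
  have h : (code_url url).toList = (code_url_alt url).toList :=
    (code_url_toList url).trans (code_url_alt_toList url).symm
  calc code_url url = String.ofList (code_url url).toList := (String.ofList_toList).symm
    _ = String.ofList (code_url_alt url).toList := by rw [h]
    _ = code_url_alt url := String.ofList_toList
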